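-- pv_equiv track=rewrite | github.com/Demo-MCP/mcp-cross-account-pipeline | pr-context-mcp/analyzer.py | _generate_approval_considerations
-- ===== SOURCE A (Python) =====
-- from typing import Dict, List, Any, Optional
--
-- def _generate_approval_considerations(findings: List[Dict]) -> List[str]:
--     """Generate approval considerations based on findings"""
--     considerations = []
--
--     # Group findings by category
--     categories = {}
--     for finding in findings:
--         category = finding["category"]
--         if category not in categories:
--             categories[category] = []
--         categories[category].append(finding)
--
--     # Generate considerations per category
--     if "iam" in categories:
--         iam_findings = categories["iam"]
--         critical_iam = [f for f in iam_findings if f["severity"] in ["critical", "high"]]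
--         if critical_iam:
--             considerations.append("Review IAM permissions carefully - overly broad permissions detected")
--
--     if "network" in categories:
--         net_findings = categories["network"]
--         public_exposure = [f for f in net_findings if "public" in f["risk"].lower()]
--         if public_exposure:
--             considerations.append("Verify public network exposure is intentional and properly secured")
--
--     if "secrets" in categories:
--         considerations.append("Ensure no secrets or credentials are exposed in the changes")
--
--     if "ops" in categories:
--         ops_findings = categories["ops"]
--         deletion_protection = [f for f in ops_findings if "deletion" in f["risk"].lower()]
--         if deletion_protection:
--             considerations.append("Consider data protection implications of disabling safeguards")
--
--     if not considerations:
--         considerations.append("Standard code review practices apply")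
--
--     return considerations
-- ===== SOURCE B (Python) =====
-- def _sev_hit(f):
--     return f["severity"] in ("critical", "high")
--
-- def _pub_hit(f):
--     return "public" in f["risk"].lower()
--
-- def _del_hit(f):
--     return "deletion" in f["risk"].lower()
--
-- def _generate_approval_considerations(findings):
--     """Generate approval considerations based on findings (single pass, no grouping)."""
--     iam = net = sec = ops = False
--     for f in findings:
--         c = f["category"]
--         if c == "iam":
--             iam = _sev_hit(f) or iam
--         elif c == "network":
--             net = _pub_hit(f) or net
--         elif c == "secrets":
--             sec = True
--         elif c == "ops":
--             ops = _del_hit(f) or ops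
--     considerations = []
--     if iam:
--         considerations.append("Review IAM permissions carefully - overly broad permissions detected")
--     if net:
--         considerations.append("Verify public network exposure is intentional and properly secured")
--     if sec:
--         considerations.append("Ensure no secrets or credentials are exposed in the changes")
--     if ops:
--         considerations.append("Consider data protection implications of disabling safeguards")
--     return considerations or ["Standard code review practices apply"]
-- ===== Notes on version B (the rewrite author's own statement) =====
-- stated objective: simpler
-- what changed: Replaces the dict grouping pass plus four per-category comprehension scans by a single pass over the findings that maintains four boolean flags, then emits the messages from the flags.
import Mathlib
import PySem

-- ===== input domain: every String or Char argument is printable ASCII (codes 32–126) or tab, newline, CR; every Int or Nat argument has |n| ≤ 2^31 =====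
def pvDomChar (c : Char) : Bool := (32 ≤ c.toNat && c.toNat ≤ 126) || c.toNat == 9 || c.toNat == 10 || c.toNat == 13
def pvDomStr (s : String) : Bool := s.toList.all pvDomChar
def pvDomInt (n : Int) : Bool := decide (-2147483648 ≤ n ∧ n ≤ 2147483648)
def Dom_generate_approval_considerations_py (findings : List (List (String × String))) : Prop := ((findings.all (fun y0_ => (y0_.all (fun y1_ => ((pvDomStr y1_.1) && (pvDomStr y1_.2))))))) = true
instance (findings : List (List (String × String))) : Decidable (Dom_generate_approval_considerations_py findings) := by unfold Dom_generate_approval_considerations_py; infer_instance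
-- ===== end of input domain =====

-- B replaces A's dict-grouping pass plus four per-category rescans by one pass keeping four boolean flags (simpler decomposition, same results).


-- ===== PORT A =====
-- the comprehension conditions of A (and reused by B): f["severity"] in ["critical","high"],
-- "public" in f["risk"].lower(), "deletion" in f["risk"].lower()
def pvSevHit (f : List (String × String)) : Bool :=
  let s := (PySem.Dict.mk f).getD "severity" ""
  s == "critical" || s == "high"

def pvPubHit (f : List (String × String)) : Bool :=
  PySem.Str.isIn "public" (PySem.Str.lower ((PySem.Dict.mk f).getD "risk" ""))

def pvDelHit (f : List (String × String)) : Bool :=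
  PySem.Str.isIn "deletion" (PySem.Str.lower ((PySem.Dict.mk f).getD "risk" ""))

-- A's grouping-loop body: categories[finding["category"]] gets finding appended (creating the entry first)
def pvStepA (cats : PySem.Dict String (List (List (String × String)))) (finding : List (String × String)) :
    PySem.Dict String (List (List (String × String))) :=
  let category := (PySem.Dict.mk finding).getD "category" ""
  let cats := if cats.contains category then cats else cats.insert category []
  cats.modify category [] (fun l => l ++ [finding])

def generate_approval_considerations_py (findings : List (List (String × String))) : List String :=
  let categories := findings.foldl pvStepA PySem.Dict.empty
  let considerations : List String := []
  let considerations :=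
    match categories.get? "iam" with
    | some iam_findings =>
        let critical_iam := iam_findings.filter (fun f => pvSevHit f)
        if critical_iam.isEmpty then considerations
        else considerations ++ ["Review IAM permissions carefully - overly broad permissions detected"]
    | none => considerations
  let considerations :=
    match categories.get? "network" with
    | some net_findings =>
        let public_exposure := net_findings.filter (fun f => pvPubHit f)
        if public_exposure.isEmpty then considerations
        else considerations ++ ["Verify public network exposure is intentional and properly secured"]
    | none => considerations
  let considerations :=
    match categories.get? "secrets" with
    | some _ => considerations ++ ["Ensure no secrets or credentials are exposed in the changes"]
    | none => considerations
  let considerations :=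
    match categories.get? "ops" with
    | some ops_findings =>
        let deletion_protection := ops_findings.filter (fun f => pvDelHit f)
        if deletion_protection.isEmpty then considerations
        else considerations ++ ["Consider data protection implications of disabling safeguards"]
    | none => considerations
  if considerations.isEmpty then ["Standard code review practices apply"] else considerations

-- ===== PORT B =====
-- B's loop body: update the four flags from one finding
def pvStepB (st : Bool × Bool × Bool × Bool) (f : List (String × String)) : Bool × Bool × Bool × Bool :=
  let c := (PySem.Dict.mk f).getD "category" ""
  if c == "iam" then (pvSevHit f || st.1, st.2.1, st.2.2.1, st.2.2.2)
  else if c == "network" then (st.1, pvPubHit f || st.2.1, st.2.2.1, st.2.2.2)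
  else if c == "secrets" then (st.1, st.2.1, true, st.2.2.2)
  else if c == "ops" then (st.1, st.2.1, st.2.2.1, pvDelHit f || st.2.2.2)
  else st

def generate_approval_considerations_py_alt (findings : List (List (String × String))) : List String :=
  let st := findings.foldl pvStepB (false, false, false, false)
  let considerations : List String := []
  let considerations := if st.1 then considerations ++ ["Review IAM permissions carefully - overly broad permissions detected"] else considerations
  let considerations := if st.2.1 then considerations ++ ["Verify public network exposure is intentional and properly secured"] else considerations
  let considerations := if st.2.2.1 then considerations ++ ["Ensure no secrets or credentials are exposed in the changes"] else considerations
  let considerations := if st.2.2.2 then considerations ++ ["Consider data protection implications of disabling safeguards"] else considerations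
  if considerations.isEmpty then ["Standard code review practices apply"] else considerations

-- ===== PRECONDITION & SPEC =====
-- Pre_ excludes exactly the inputs on which the Python raises KeyError: a finding without a
-- "category" key, an "iam" finding without "severity", or a "network"/"ops" finding without "risk".
def Pre_generate_approval_considerations_py (findings : List (List (String × String))) : Prop :=
  ∀ f ∈ findings,
    ((PySem.Dict.mk f).get? "category").isSome = true ∧
    ((PySem.Dict.mk f).getD "category" "" = "iam" → ((PySem.Dict.mk f).get? "severity").isSome = true) ∧
    (((PySem.Dict.mk f).getD "category" "" = "network" ∨ (PySem.Dict.mk f).getD "category" "" = "ops") →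
      ((PySem.Dict.mk f).get? "risk").isSome = true)
instance (findings : List (List (String × String))) : Decidable (Pre_generate_approval_considerations_py findings) := by
  unfold Pre_generate_approval_considerations_py; infer_instance

def pvWitness_generate_approval_considerations_py : (List (List (String × String))) :=
  [[("category", "secrets")], [("category", "iam"), ("severity", "high")]]

def Spec_generate_approval_considerations_py (findings : List (List (String × String))) (out : List String) : Prop := out = generate_approval_considerations_py_alt findings
instance (findings : List (List (String × String))) (out : List String) : Decidable (Spec_generate_approval_considerations_py findings out) := by unfold Spec_generate_approval_considerations_py; infer_instance

-- ===== CLAIM (what is proved, stated in full; the proofs are below) =====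
def Claim_equal_generate_approval_considerations_py : Prop := ∀ (findings : List (List (String × String))), Dom_generate_approval_considerations_py findings → Pre_generate_approval_considerations_py findings → Spec_generate_approval_considerations_py findings (generate_approval_considerations_py findings)

-- ===== LEMMAS AND PROOFS =====

-- the category of a finding, as both ports read it
def pvCat (f : List (String × String)) : String := (PySem.Dict.mk f).getD "category" ""

-- the message list both ports assemble, as a function of the four per-category conditions
def pvRender (b1 b2 b3 b4 : Bool) : List String :=
  let considerations : List String := []
  let considerations := if b1 then considerations ++ ["Review IAM permissions carefully - overly broad permissions detected"] else considerations
  let considerations := if b2 then considerations ++ ["Verify public network exposure is intentional and properly secured"] else considerations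
  let considerations := if b3 then considerations ++ ["Ensure no secrets or credentials are exposed in the changes"] else considerations
  let considerations := if b4 then considerations ++ ["Consider data protection implications of disabling safeguards"] else considerations
  if considerations.isEmpty then ["Standard code review practices apply"] else considerations

lemma pvStepA_getD (d : PySem.Dict String (List (List (String × String))))
    (f : List (String × String)) (c : String) :
    (pvStepA d f).getD c [] = d.getD c [] ++ (if pvCat f = c then [f] else []) := by
  unfold pvStepA pvCat
  set k := (PySem.Dict.mk f).getD "category" "" with hk
  by_cases h : c = k
  · by_cases hc : d.contains k
    · simp [hc, h]
    · simp [hc, h,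
            PySem.Dict.getD_of_not_contains d ([] : List (List (String × String))) (by simpa using hc)]
  · have h' : ¬(k = c) := fun e => h e.symm
    by_cases hc : d.contains k <;>
      simp [hc, PySem.Dict.getD_modify, PySem.Dict.getD_insert, h, h']

lemma pvStepA_contains (d : PySem.Dict String (List (List (String × String))))
    (f : List (String × String)) (c : String) :
    (pvStepA d f).contains c = (decide (pvCat f = c) || d.contains c) := by
  unfold pvStepA pvCat
  set k := (PySem.Dict.mk f).getD "category" "" with hk
  by_cases h : c = k
  · by_cases hc : d.contains k <;>
      simp [hc, PySem.Dict.contains_modify, h]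
  · have h' : ¬(k = c) := fun e => h e.symm
    by_cases hc : d.contains k <;>
      simp [hc, PySem.Dict.contains_modify, PySem.Dict.contains_insert, h, h']

lemma pvBuild_getD (l : List (List (String × String)))
    (d : PySem.Dict String (List (List (String × String)))) (c : String) :
    (l.foldl pvStepA d).getD c [] = d.getD c [] ++ l.filter (fun f => pvCat f = c) := by
  induction l generalizing d with
  | nil => simp
  | cons f l ih =>
    simp only [List.foldl_cons, ih, pvStepA_getD, List.filter_cons]
    split_ifs <;> simp_all

lemma pvBuild_contains (l : List (List (String × String)))
    (d : PySem.Dict String (List (List (String × String)))) (c : String) :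
    (l.foldl pvStepA d).contains c = (d.contains c || l.any (fun f => pvCat f = c)) := by
  induction l generalizing d with
  | nil => simp
  | cons f l ih =>
    simp only [List.foldl_cons, ih, pvStepA_contains, List.any_cons]
    cases d.contains c <;> cases hf : decide (pvCat f = c) <;> simp

lemma pvGroup_get? (findings : List (List (String × String))) (c : String) :
    (findings.foldl pvStepA PySem.Dict.empty).get? c =
      (if findings.any (fun f => pvCat f = c) then some (findings.filter (fun f => pvCat f = c)) else none) := by
  by_cases h : findings.any (fun f => pvCat f = c)
  · have hc : (findings.foldl pvStepA PySem.Dict.empty).contains c = true := by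
      simp [pvBuild_contains, h]
    have hs := (PySem.Dict.contains_eq_isSome_get? _ c) ▸ hc
    obtain ⟨v, hv⟩ := Option.isSome_iff_exists.mp hs
    have h2 := pvBuild_getD findings PySem.Dict.empty c
    rw [PySem.Dict.getD_eq_get?_getD, hv] at h2
    simp only [Option.getD_some, PySem.Dict.getD_empty, List.nil_append] at h2
    simp [hv, h, h2]
  · have hc : (findings.foldl pvStepA PySem.Dict.empty).contains c = false := by
      simp only [pvBuild_contains, PySem.Dict.contains_empty, Bool.false_or]
      simpa using h
    simp [h, (PySem.Dict.get?_eq_none_iff_contains _ c).mpr hc]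

lemma pvFlags (l : List (List (String × String))) (st : Bool × Bool × Bool × Bool) :
    l.foldl pvStepB st =
      (st.1 || l.any (fun f => pvCat f = "iam" && pvSevHit f),
       st.2.1 || l.any (fun f => pvCat f = "network" && pvPubHit f),
       st.2.2.1 || l.any (fun f => pvCat f = "secrets"),
       st.2.2.2 || l.any (fun f => pvCat f = "ops" && pvDelHit f)) := by
  induction l generalizing st with
  | nil => simp
  | cons f l ih =>
    simp only [List.foldl_cons, ih, List.any_cons]
    unfold pvStepB pvCat
    obtain ⟨s1, s2, s3, s4⟩ := st
    by_cases h1 : (PySem.Dict.mk f).getD "category" "" = "iam"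
    · simp [h1, Bool.or_comm, Bool.or_assoc]
    · by_cases h2 : (PySem.Dict.mk f).getD "category" "" = "network"
      · simp [h2, Bool.or_comm, Bool.or_assoc]
      · by_cases h3 : (PySem.Dict.mk f).getD "category" "" = "secrets"
        · simp [h3]
        · by_cases h4 : (PySem.Dict.mk f).getD "category" "" = "ops"
          · simp [h4, Bool.or_comm, Bool.or_assoc]
          · simp [h1, h2, h3, h4]

-- the double filter of A is empty iff no finding matches both the category and the predicate
lemma pvFilterIsEmpty (l : List (List (String × String))) (q p : List (String × String) → Bool) :
    ((l.filter q).filter p).isEmpty = !(l.any (fun f => q f && p f)) := by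
  rw [List.filter_filter]
  induction l with
  | nil => simp
  | cons a l ih =>
    cases hq : q a <;> cases hp : p a <;> simp [List.any_cons, hq, hp, ih]

lemma pvIfFalse (b : Bool) (x y : List String) :
    (if b = false then x else y) = if b = true then y else x := by
  cases b <;> simp

lemma pvAnyAnd (l : List (List (String × String))) (q p : List (String × String) → Bool)
    (h : l.any q = false) : l.any (fun f => q f && p f) = false := by
  simp only [List.any_eq_false] at h ⊢
  intro a ha
  simp [h a ha]

set_option maxHeartbeats 1600000 in
lemma pvA_eq_render (findings : List (List (String × String))) :
    generate_approval_considerations_py findings =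
      pvRender (findings.any (fun f => pvCat f = "iam" && pvSevHit f))
               (findings.any (fun f => pvCat f = "network" && pvPubHit f))
               (findings.any (fun f => pvCat f = "secrets"))
               (findings.any (fun f => pvCat f = "ops" && pvDelHit f)) := by
  simp only [generate_approval_considerations_py]
  rw [pvGroup_get? findings "iam", pvGroup_get? findings "network",
      pvGroup_get? findings "secrets", pvGroup_get? findings "ops"]
  cases hi : findings.any (fun f => pvCat f = "iam") <;>
  cases hn : findings.any (fun f => pvCat f = "network") <;>
  cases hs : findings.any (fun f => pvCat f = "secrets") <;>
  cases ho : findings.any (fun f => pvCat f = "ops") <;>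
    simp only [hi, hn, ho, hs, if_true, if_false, Bool.false_eq_true, pvFilterIsEmpty,
               Bool.not_eq_true', pvIfFalse, pvRender,
               pvAnyAnd]

lemma pvB_eq_render (findings : List (List (String × String))) :
    generate_approval_considerations_py_alt findings =
      pvRender (findings.any (fun f => pvCat f = "iam" && pvSevHit f))
               (findings.any (fun f => pvCat f = "network" && pvPubHit f))
               (findings.any (fun f => pvCat f = "secrets"))
               (findings.any (fun f => pvCat f = "ops" && pvDelHit f)) := by
  simp only [generate_approval_considerations_py_alt, pvFlags, pvRender, Bool.false_or]

-- ===== VERDICT (by name: the statement is the Claim_ definition above) =====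
theorem generate_approval_considerations_py_spec : Claim_equal_generate_approval_considerations_py := by
  intro findings _ _
  show generate_approval_considerations_py findings = generate_approval_considerations_py_alt findings
  rw [pvA_eq_render, pvB_eq_render]
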